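-- pv_equiv track=rewrite | github.com/Mugadina/Ylab | hm1/hm1.py | count_find_num
-- ===== SOURCE A (Python) =====
-- from functools import reduce
--
-- def count_find_num(primesL, limit):
--     numbers = reduce((lambda a, b: a * b), primesL, 1)
--     if numbers > limit:
--         return []
--     nums = [numbers]
--     for i in primesL:
--         for n in nums:
--             num = n * i
--             while (num <= limit) and (num not in nums):
--                 nums.append(num)
--                 num *= i
--     return [len(nums), max(nums)]
-- ===== SOURCE B (Python) =====
-- def count_find_num(primesL, limit):
--     numbers = 1
--     for p in primesL:
--         numbers *= p
--     if numbers > limit: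
--         return []
--     seen = {numbers}
--     stack = [numbers]
--     count = 0
--     best = numbers
--     while stack:
--         x = stack.pop()
--         count += 1
--         if x > best:
--             best = x
--         for p in primesL:
--             y = x * p
--             if y <= limit and y not in seen:
--                 seen.add(y)
--                 stack.append(y)
--     return [count, best]
-- ===== Notes on version B (the rewrite author's own statement) =====
-- stated objective: alternative
-- what changed: A saturates powers prime-by-prime over a single growing list rescanned by 'num not in nums'; B runs one worklist (stack) closure over primesL with a hash seen-set, counting and tracking the maximum on the fly instead of materialising and rescanning a list. Pre_ excludes lists containing a negative number (unless the product already exceeds limit or 0 occurs, where nothing is generated): the natural domain is a list of primes, A diverges on many such lists (e.g. [-1, 2]) and where it returns, its value is an artefact of its chain pruning.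
-- outside the precondition, e.g. on count_find_num([-3, -1, -1], 62): A returns [6, 27], B returns [7, 27]; on count_find_num([-3], 10): A returns [3, 9], B returns [3, 9]
import Mathlib
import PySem

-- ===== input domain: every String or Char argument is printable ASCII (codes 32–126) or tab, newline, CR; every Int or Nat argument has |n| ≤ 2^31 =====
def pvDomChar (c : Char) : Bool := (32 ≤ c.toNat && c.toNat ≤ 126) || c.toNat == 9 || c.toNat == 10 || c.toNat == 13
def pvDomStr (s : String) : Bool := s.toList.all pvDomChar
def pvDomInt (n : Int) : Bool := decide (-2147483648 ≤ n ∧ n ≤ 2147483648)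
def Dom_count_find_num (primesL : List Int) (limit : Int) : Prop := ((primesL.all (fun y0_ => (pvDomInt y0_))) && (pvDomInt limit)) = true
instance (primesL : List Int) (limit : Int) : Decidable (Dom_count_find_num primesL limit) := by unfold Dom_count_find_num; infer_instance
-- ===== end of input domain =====

-- B replaces A's per-prime saturation over a growing list (rescanned by 'num not in nums')
-- by a single worklist (stack) closure with a seen-set, counting and tracking the maximum
-- on the fly instead of materialising a list (objective: alternative).

-- ===== PORT A =====
-- the inner 'while (num <= limit) and (num not in nums): nums.append(num); num *= i'.
-- Fuel is a totality artifact only (A loops forever on some inputs outside Pre_); none = fuel ran out.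
def aChain (p limit : Int) : Nat → List Int → Int → Option (List Int)
  | 0, _, _ => none
  | fuel + 1, nums, num =>
      if num ≤ limit ∧ ¬ num ∈ nums then aChain p limit fuel (nums ++ [num]) (num * p)
      else some nums

-- 'for n in nums' over the LIVE, growing list: Python iterates by index until it reaches the current length.
def aInner (p limit : Int) : Nat → List Int → Nat → Option (List Int)
  | 0, _, _ => none
  | fuel + 1, nums, j =>
      match nums[j]? with
      | none => some nums
      | some n =>
          match aChain p limit ((limit - n * p).toNat + 2) nums (n * p) with
          | none => none
          | some nums' => aInner p limit fuel nums' (j + 1)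

-- 'for i in primesL'
def aOuter (limit : Int) : List Int → List Int → Option (List Int)
  | [], nums => some nums
  | i :: rest, nums =>
      match aInner i limit (limit.toNat + 2) nums 0 with
      | none => none
      | some nums' => aOuter limit rest nums'

def count_find_num (primesL : List Int) (limit : Int) : List Int :=
  let numbers := primesL.foldl (· * ·) 1          -- reduce(lambda a, b: a * b, primesL, 1)
  if numbers > limit then []
  else
    match aOuter limit primesL [numbers] with
    | some nums => [(nums.length : Int), (PySem.List.max? nums (fun y => y)).getD 0]  -- nums provably nonempty: max() cannot raise
    | none => []                                   -- unreachable under Pre_ (fuel exhausted)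

-- ===== PORT B =====
-- 'for p in primesL: y = x * p; if y <= limit and y not in seen: seen.add(y); stack.append(y)'
-- (the stack is represented head-first: append = cons, pop = take the head)
def bInner (limit x : Int) : List Int → List Int → PySem.Set Int → List Int × PySem.Set Int
  | [], stack, seen => (stack, seen)
  | p :: ps, stack, seen =>
      let y := x * p
      if y ≤ limit ∧ ¬ y ∈ seen then bInner limit x ps (y :: stack) (PySem.Set.add seen y)
      else bInner limit x ps stack seen

-- 'while stack: x = stack.pop(); count += 1; if x > best: best = x; …'
-- Fuel is a totality artifact only; none = fuel ran out (unreachable under Pre_).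
def bLoop (P : List Int) (limit : Int) : Nat → List Int → PySem.Set Int → Int → Int → Option (List Int)
  | 0, _, _, _, _ => none
  | fuel + 1, stack, seen, cnt, best =>
      match stack with
      | [] => some [cnt, best]
      | x :: rest =>
          let cnt' := cnt + 1
          let best' := if x > best then x else best
          let st := bInner limit x P rest seen
          bLoop P limit fuel st.1 st.2 cnt' best'

def count_find_num_alt (primesL : List Int) (limit : Int) : List Int :=
  let numbers := primesL.foldl (· * ·) 1           -- 'numbers = 1; for p in primesL: numbers *= p'
  if numbers > limit then []
  else
    match bLoop primesL limit (limit.toNat + 2) [numbers] (PySem.Set.ofList [numbers]) 0 numbers with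
    | some r => r
    | none => []                                    -- unreachable under Pre_ (fuel exhausted)

-- ===== PRECONDITION & SPEC =====
-- Pre_ excludes lists containing a negative number, except when the product already exceeds
-- limit or a 0 occurs (then A's loop generates nothing and both return [] resp. [1, 0]): on the
-- excluded inputs A loops forever on many lists (e.g. primesL = [-1, 2] or [-2, 3]) and where it
-- returns, its value is an artefact of its chain pruning; the natural domain is a list of primes.
def Pre_count_find_num (primesL : List Int) (limit : Int) : Prop :=
  (∀ p ∈ primesL, 0 ≤ p) ∨ primesL.prod > limit ∨ 0 ∈ primesL
instance (primesL : List Int) (limit : Int) : Decidable (Pre_count_find_num primesL limit) := by unfold Pre_count_find_num; infer_instance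

def pvWitness_count_find_num : List Int × Int := ([2, 3], 200)

def Spec_count_find_num (primesL : List Int) (limit : Int) (out : List Int) : Prop := out = count_find_num_alt primesL limit
instance (primesL : List Int) (limit : Int) (out : List Int) : Decidable (Spec_count_find_num primesL limit out) := by unfold Spec_count_find_num; infer_instance

-- ===== CLAIM (what is proved, stated in full; the proofs are below) =====
def Claim_equal_count_find_num : Prop := ∀ (primesL : List Int) (limit : Int), Dom_count_find_num primesL limit → Pre_count_find_num primesL limit → Spec_count_find_num primesL limit (count_find_num primesL limit)

-- ===== LEMMAS AND PROOFS =====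

theorem list_prod_pos {l : List Int} (h : ∀ q ∈ l, 1 ≤ q) : 1 ≤ l.prod := by
  induction l with
  | nil => simp
  | cons a t ih =>
      simp only [List.prod_cons]
      have ha := h a (by simp)
      have ht := ih (fun q hq => h q (by simp [hq]))
      nlinarith

theorem length_le_of_nodup_bounds {nums : List Int} {limit : Int}
    (hnd : nums.Nodup) (hb : ∀ x ∈ nums, 1 ≤ x ∧ x ≤ limit) :
    nums.length ≤ limit.toNat := by
  have hsub : nums.toFinset ⊆ Finset.Icc 1 limit := by
    intro x hx
    rw [List.mem_toFinset] at hx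
    rcases hb x hx with ⟨h1, h2⟩
    exact Finset.mem_Icc.mpr ⟨h1, h2⟩
  have hcard := Finset.card_le_card hsub
  rw [List.toFinset_card_of_nodup hnd, Int.card_Icc] at hcard
  omega

-- A: the chain lemma
theorem aChain_main (p limit : Int) (G : Int → Prop) (hGmul : ∀ x, G x → G (x * p)) (hp : 1 ≤ p) :
    ∀ (fuel : Nat) (nums : List Int) (num : Int), 1 ≤ num → G num →
    nums.Nodup → (∀ x ∈ nums, 1 ≤ x ∧ x ≤ limit) →
    1 ≤ fuel → limit + 2 ≤ (fuel : Int) + num →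
    ∃ r, aChain p limit fuel nums num = some r ∧ nums.IsPrefix r ∧ r.Nodup ∧
      (∀ x ∈ r, 1 ≤ x ∧ x ≤ limit) ∧ (∀ x ∈ r, x ∈ nums ∨ G x) ∧
      (num ≤ limit → num ∈ r) := by
  intro fuel
  induction fuel with
  | zero => intro _ _ _ _ _ _ hf _; omega
  | succ f ih =>
      intro nums num h1 hG hnd hb _ harith
      by_cases hc : num ≤ limit ∧ ¬ num ∈ nums
      · have hstep : aChain p limit (f + 1) nums num = aChain p limit f (nums ++ [num]) (num * p) := by
          simp only [aChain, if_pos hc]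
        have hf1 : 1 ≤ f := by omega
        have hnd' : (nums ++ [num]).Nodup := by
          rw [List.nodup_append]
          refine ⟨hnd, List.nodup_singleton _, ?_⟩
          intro a ha b hb
          simp only [List.mem_singleton] at hb
          subst hb
          exact fun h => hc.2 (h ▸ ha)
        have hb' : ∀ x ∈ nums ++ [num], 1 ≤ x ∧ x ≤ limit := by
          intro x hx
          rcases List.mem_append.mp hx with hx | hx
          · exact hb x hx
          · simp at hx; subst hx; exact ⟨h1, hc.1⟩
        rcases eq_or_lt_of_le hp with hp1 | hp2
        · -- p = 1 : the next step finds num * 1 = num already present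
          have hpe : p = 1 := hp1.symm
          have hnum1 : num * p = num := by rw [hpe, mul_one]
          obtain ⟨f', rfl⟩ : ∃ f', f = f' + 1 := ⟨f - 1, by omega⟩
          have hstop : aChain p limit (f' + 1) (nums ++ [num]) (num * p) = some (nums ++ [num]) := by
            simp only [aChain, hnum1]
            rw [if_neg]
            simp
          refine ⟨nums ++ [num], by rw [hstep, hstop], List.prefix_append _ _, hnd', hb', ?_, ?_⟩
          · intro x hx
            rcases List.mem_append.mp hx with hx | hx
            · exact Or.inl hx
            · simp at hx; subst hx; exact Or.inr hG
          · intro _; simp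
        · -- 2 ≤ p
          have h2p : 2 ≤ p := hp2
          have h1' : 1 ≤ num * p := by nlinarith
          have harith' : limit + 2 ≤ (f : Int) + num * p := by
            have : num + 1 ≤ num * p := by nlinarith
            push_cast at harith ⊢
            omega
          obtain ⟨r, hr, hpre, hrnd, hrb, hrG, _⟩ :=
            ih (nums ++ [num]) (num * p) h1' (hGmul num hG) hnd' hb' hf1 harith'
          refine ⟨r, by rw [hstep]; exact hr, (List.prefix_append _ _).trans hpre, hrnd, hrb, ?_, ?_⟩
          · intro x hx
            rcases hrG x hx with hx' | hx'
            · rcases List.mem_append.mp hx' with h | h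
              · exact Or.inl h
              · simp at h; subst h; exact Or.inr hG
            · exact Or.inr hx'
          · intro _
            exact hpre.subset (by simp)
      · refine ⟨nums, ?_, List.prefix_refl _, hnd, hb, fun x hx => Or.inl hx, ?_⟩
        · simp only [aChain, if_neg hc]
        · intro hle
          by_contra hmem
          exact hc ⟨hle, hmem⟩

-- A: the middle loop lemma
theorem aInner_main (p limit : Int) (G : Int → Prop) (hGmul : ∀ x, G x → G (x * p)) (hp : 1 ≤ p) :
    ∀ (fuel : Nat) (nums : List Int) (j : Nat),
    nums.Nodup → (∀ x ∈ nums, 1 ≤ x ∧ x ≤ limit) → (∀ x ∈ nums, G x) →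
    (∀ t (ht : t < nums.length), t < j → nums[t] * p ≤ limit → nums[t] * p ∈ nums) →
    limit.toNat + 1 ≤ fuel + j → j ≤ limit.toNat →
    ∃ r, aInner p limit fuel nums j = some r ∧ nums.IsPrefix r ∧ r.Nodup ∧
      (∀ x ∈ r, 1 ≤ x ∧ x ≤ limit) ∧ (∀ x ∈ r, G x) ∧
      (∀ x ∈ r, x * p ≤ limit → x * p ∈ r) := by
  intro fuel
  induction fuel with
  | zero => intro _ j _ _ _ _ hf hj; omega
  | succ f ih =>
      intro nums j hnd hb hG hproc hf hj
      match hgj : nums[j]? with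
      | none =>
          refine ⟨nums, ?_, List.prefix_refl _, hnd, hb, hG, ?_⟩
          · simp only [aInner, hgj]
          · intro x hx hxp
            obtain ⟨t, ht, hxt⟩ := List.mem_iff_getElem.mp hx
            have hlen : nums.length ≤ j := by
              by_contra hlt
              rw [List.getElem?_eq_getElem (by omega)] at hgj
              simp at hgj
            exact hxt ▸ hproc t ht (by omega) (hxt ▸ hxp)
      | some n =>
          have hjlt : j < nums.length := by
            by_contra hge
            rw [List.getElem?_eq_none (by omega)] at hgj
            simp at hgj
          have hn : n ∈ nums := by
            have := List.getElem?_eq_getElem hjlt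
            rw [hgj] at this
            exact (Option.some.inj this.symm) ▸ List.getElem_mem hjlt
          have hn1 : 1 ≤ n := (hb n hn).1
          have hnp1 : 1 ≤ n * p := by nlinarith
          obtain ⟨r', hr', hpre', hnd', hb', hsound', hmem'⟩ :=
            aChain_main p limit G hGmul hp ((limit - n * p).toNat + 2) nums (n * p)
              hnp1 (hGmul n (hG n hn)) hnd hb (by omega) (by push_cast; omega)
          have hG' : ∀ x ∈ r', G x := by
            intro x hx
            rcases hsound' x hx with h | h
            · exact hG x h
            · exact h
          have hlen_le : nums.length ≤ limit.toNat := length_le_of_nodup_bounds hnd hb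
          have hproc' : ∀ t (ht : t < r'.length), t < j + 1 → r'[t] * p ≤ limit → r'[t] * p ∈ r' := by
            intro t ht htj hle
            have htn : t < nums.length := by omega
            have hget : r'[t] = nums[t] := (hpre'.getElem htn).symm
            rcases Nat.lt_or_ge t j with hlt | hge
            · rw [hget]
              rw [hget] at hle
              exact hpre'.subset (hproc t htn hlt hle)
            · have htj' : t = j := by omega
              subst htj'
              have hnt : nums[t] = n := by
                have := List.getElem?_eq_getElem htn
                rw [hgj] at this
                exact (Option.some.inj this).symm
              rw [hget, hnt]
              rw [hget, hnt] at hle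
              exact hmem' hle
          obtain ⟨r, hr, hpre, hrnd, hrb, hrG, hrproc⟩ :=
            ih r' (j + 1) hnd' hb' hG' hproc' (by omega)
              (by have := length_le_of_nodup_bounds hnd hb; omega)
          refine ⟨r, ?_, hpre'.trans hpre, hrnd, hrb, hrG, hrproc⟩
          simp only [aInner, hgj, hr']
          exact hr

-- A: one full phase: exact set characterisation
theorem aPhase_char (p limit : Int) (hp : 1 ≤ p) (nums : List Int)
    (hnd : nums.Nodup) (hb : ∀ x ∈ nums, 1 ≤ x ∧ x ≤ limit) :
    ∃ r, aInner p limit (limit.toNat + 2) nums 0 = some r ∧ r.Nodup ∧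
      (∀ x ∈ r, 1 ≤ x ∧ x ≤ limit) ∧
      (∀ x, x ∈ r ↔ ∃ y ∈ nums, ∃ k : Nat, x = y * p ^ k ∧ x ≤ limit) := by
  have hpow : ∀ k : Nat, (1 : Int) ≤ p ^ k := fun k => one_le_pow₀ hp
  obtain ⟨r, hr, hpre, hrnd, hrb, hrG, hrclosed⟩ :=
    aInner_main p limit (fun x => ∃ y ∈ nums, ∃ k : Nat, x = y * p ^ k)
      (by rintro x ⟨y, hy, k, rfl⟩
          exact ⟨y, hy, k + 1, by ring⟩)
      hp (limit.toNat + 2) nums 0 hnd hb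
      (fun x hx => ⟨x, hx, 0, by simp⟩)
      (by intro t ht htj; omega)
      (by omega) (by omega)
  refine ⟨r, hr, hrnd, hrb, ?_⟩
  intro x
  constructor
  · intro hx
    obtain ⟨y, hy, k, rfl⟩ := hrG x hx
    exact ⟨y, hy, k, rfl, (hrb _ hx).2⟩
  · rintro ⟨y, hy, k, rfl, hle⟩
    induction k with
    | zero => simpa using hpre.subset hy
    | succ k ihk =>
        have hy1 : 1 ≤ y := (hb y hy).1
        have h1 : (1 : Int) ≤ y * p ^ k := by
          have := hpow k
          nlinarith
        have hmono : y * p ^ k ≤ y * p ^ (k + 1) := by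
          have : y * p ^ (k + 1) = (y * p ^ k) * p := by ring
          nlinarith
        have hin := ihk (le_trans hmono hle)
        have := hrclosed _ hin (by
          have : (y * p ^ k) * p = y * p ^ (k + 1) := by ring
          rw [this]; exact hle)
        have heq : (y * p ^ k) * p = y * p ^ (k + 1) := by ring
        rwa [heq] at this

theorem prod_count_filter (p : Int) : ∀ l : List Int,
    l.prod = p ^ (l.count p) * (l.filter (fun q => q ≠ p)).prod := by
  intro l
  induction l with
  | nil => simp
  | cons a t ih =>
      simp only [List.prod_cons, List.count_cons, List.filter_cons, ih]
      by_cases hap : a = p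
      · subst hap
        simp [pow_succ]
        ring
      · simp [hap]
        ring

-- A: the outer loop, characterised as 'numbers times a product of elements of rest, within limit'
theorem aOuter_char (limit : Int) :
    ∀ (rest : List Int) (nums : List Int), (∀ q ∈ rest, 1 ≤ q) →
    nums.Nodup → (∀ x ∈ nums, 1 ≤ x ∧ x ≤ limit) →
    ∃ r, aOuter limit rest nums = some r ∧ r.Nodup ∧ (∀ x ∈ r, 1 ≤ x ∧ x ≤ limit) ∧
      (∀ x, x ∈ r ↔ ∃ y ∈ nums, ∃ l : List Int, (∀ q ∈ l, q ∈ rest) ∧ x = y * l.prod ∧ x ≤ limit) := by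
  intro rest
  induction rest with
  | nil =>
      intro nums _ hnd hb
      refine ⟨nums, rfl, hnd, hb, ?_⟩
      intro x
      constructor
      · intro hx
        exact ⟨x, hx, [], by simp, by simp, (hb x hx).2⟩
      · rintro ⟨y, hy, l, hl, rfl, _⟩
        have : l = [] := List.eq_nil_iff_forall_not_mem.mpr (fun q hq => by simpa using hl q hq)
        subst this
        simpa using hy
  | cons p rest' ih =>
      intro nums hq hnd hb
      have hp : (1 : Int) ≤ p := hq p (by simp)
      obtain ⟨nums', hinner, hnd', hb', hchar'⟩ := aPhase_char p limit hp nums hnd hb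
      obtain ⟨r, hrest, hrnd, hrb, hrchar⟩ :=
        ih nums' (fun q hqq => hq q (by simp [hqq])) hnd' hb'
      refine ⟨r, ?_, hrnd, hrb, ?_⟩
      · simp only [aOuter, hinner]
        exact hrest
      · intro x
        rw [hrchar x]
        constructor
        · rintro ⟨y', hy', l, hl, rfl, hle⟩
          obtain ⟨y, hy, k, rfl, _⟩ := (hchar' y').mp hy'
          refine ⟨y, hy, List.replicate k p ++ l, ?_, by
            rw [List.prod_append, List.prod_replicate]; ring, hle⟩
          intro q hqm
          rcases List.mem_append.mp hqm with h | h
          · simp [List.eq_of_mem_replicate h]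
          · simp [hl q h]
        · rintro ⟨y, hy, l, hl, rfl, hle⟩
          have hy1 : 1 ≤ y := (hb y hy).1
          have hpowp : (1 : Int) ≤ p ^ (l.count p) := one_le_pow₀ hp
          have hfprod : (1 : Int) ≤ (l.filter (fun q => q ≠ p)).prod := by
            apply list_prod_pos
            intro q hqm
            exact hq q (hl q (List.mem_of_mem_filter hqm))
          have hprodeq := prod_count_filter p l
          have h0 : 0 ≤ y * p ^ (l.count p) := by nlinarith
          have hy'le : y * p ^ (l.count p) ≤ limit := by
            calc y * p ^ (l.count p) ≤ y * p ^ (l.count p) * (l.filter (fun q => q ≠ p)).prod :=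
                  le_mul_of_one_le_right h0 hfprod
              _ = y * l.prod := by rw [hprodeq]; ring
              _ ≤ limit := hle
          refine ⟨y * p ^ (l.count p), ?_, l.filter (fun q => q ≠ p), ?_, ?_, hle⟩
          · exact (hchar' _).mpr ⟨y, hy, l.count p, rfl, hy'le⟩
          · intro q hqm
            have h1 := List.mem_of_mem_filter hqm
            have h2 := List.of_mem_filter hqm
            have : q ≠ p := by simpa using h2
            rcases List.mem_cons.mp (hl q h1) with h | h
            · exact absurd h this
            · exact h
          · rw [hprodeq]; ring

-- B: the inner 'for p in primesL' pass
theorem bInner_main (limit x : Int) :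
    ∀ (ps stack : List Int) (seen : PySem.Set Int),
    List.Nodup seen → List.Nodup stack → (∀ z ∈ stack, z ∈ seen) →
    ∃ q' s', bInner limit x ps stack seen = (q', s') ∧
      List.Nodup s' ∧ List.Nodup q' ∧ (∀ z ∈ q', z ∈ s') ∧
      (∀ z ∈ seen, z ∈ s') ∧
      (∀ z ∈ s', z ∈ seen ∨ ∃ p ∈ ps, z = x * p ∧ z ≤ limit) ∧
      (∀ z, z ∈ q' ↔ z ∈ stack ∨ (z ∈ s' ∧ z ∉ seen)) ∧
      (∀ p ∈ ps, x * p ≤ limit → x * p ∈ s') ∧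
      s'.length + stack.length = seen.length + q'.length := by
  intro ps
  induction ps with
  | nil =>
      intro stack seen hsnd hqnd hqs
      exact ⟨stack, seen, rfl, hsnd, hqnd, hqs, fun z hz => hz,
        fun z hz => Or.inl hz,
        fun z => ⟨fun h => Or.inl h, fun h => by
          rcases h with h | ⟨h1, h2⟩
          · exact h
          · exact absurd h1 h2⟩,
        by simp, rfl⟩
  | cons p ps' ih =>
      intro stack seen hsnd hqnd hqs
      by_cases hc : x * p ≤ limit ∧ ¬ x * p ∈ seen
      · have hstep : bInner limit x (p :: ps') stack seen
            = bInner limit x ps' (x * p :: stack) (PySem.Set.add seen (x * p)) := by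
          simp only [bInner, if_pos hc]
        have hadd : PySem.Set.add seen (x * p) = seen ++ [x * p] := by
          simp [PySem.Set.add, PySem.Set.contains, hc.2]
        have hsnd' : List.Nodup (seen ++ [x * p]) := by
          rw [List.nodup_append]
          refine ⟨hsnd, List.nodup_singleton _, ?_⟩
          intro a ha b hb
          simp only [List.mem_singleton] at hb
          subst hb
          exact fun h => hc.2 (h ▸ ha)
        have hqnd' : List.Nodup (x * p :: stack) := by
          refine List.nodup_cons.mpr ⟨fun h => hc.2 (hqs _ h), hqnd⟩
        have hqs' : ∀ z ∈ x * p :: stack, z ∈ seen ++ [x * p] := by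
          intro z hz
          rcases List.mem_cons.mp hz with h | h
          · simp [h]
          · simp [hqs z h]
        obtain ⟨q', s', hrun, h1, h2, h3, h4, h5, h6, h7, h8⟩ :=
          ih (x * p :: stack) (seen ++ [x * p]) hsnd' hqnd' hqs'
        rw [hadd] at hstep
        refine ⟨q', s', hstep ▸ hrun, h1, h2, h3, ?_, ?_, ?_, ?_, ?_⟩
        · intro z hz; exact h4 z (by simp [hz])
        · intro z hz
          rcases h5 z hz with h | ⟨pp, hpp, hzz⟩
          · rcases List.mem_append.mp h with h | h
            · exact Or.inl h
            · simp only [List.mem_singleton] at h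
              exact Or.inr ⟨p, by simp, h, h ▸ hc.1⟩
          · exact Or.inr ⟨pp, by simp [hpp], hzz⟩
        · intro z
          rw [h6 z]
          have hxp : x * p ∈ s' := h4 _ (by simp)
          constructor
          · rintro (h | ⟨h1', h2'⟩)
            · rcases List.mem_cons.mp h with h | h
              · exact Or.inr ⟨h ▸ hxp, h ▸ hc.2⟩
              · exact Or.inl h
            · refine Or.inr ⟨h1', fun hzseen => h2' (by simp [hzseen])⟩
          · rintro (h | ⟨h1', h2'⟩)
            · exact Or.inl (by simp [h])
            · by_cases hz : z = x * p
              · exact Or.inl (by simp [hz])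
              · refine Or.inr ⟨h1', ?_⟩
                intro hmem
                rcases List.mem_append.mp hmem with h | h
                · exact h2' h
                · simp only [List.mem_singleton] at h
                  exact hz h
        · intro pp hpp hle
          rcases List.mem_cons.mp hpp with h | h
          · exact h4 _ (by simp [h])
          · exact h7 pp h hle
        · simp [List.length_append, List.length_cons] at h8
          omega
      · have hstep : bInner limit x (p :: ps') stack seen
            = bInner limit x ps' stack seen := by
          simp only [bInner, if_neg hc]
        obtain ⟨q', s', hrun, h1, h2, h3, h4, h5, h6, h7, h8⟩ := ih stack seen hsnd hqnd hqs
        refine ⟨q', s', hstep ▸ hrun, h1, h2, h3, h4, ?_, h6, ?_, h8⟩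
        · intro z hz
          rcases h5 z hz with h | ⟨pp, hpp, hzz⟩
          · exact Or.inl h
          · exact Or.inr ⟨pp, by simp [hpp], hzz⟩
        · intro pp hpp hle
          rcases List.mem_cons.mp hpp with h | h
          · subst h
            have : x * pp ∈ seen := by
              by_contra hnm
              exact hc ⟨hle, hnm⟩
            exact h4 _ this
          · exact h7 pp h hle

-- B: the worklist loop
theorem bLoop_main (P : List Int) (limit : Int) (G : Int → Prop)
    (hGmul : ∀ z p, G z → p ∈ P → G (z * p)) (hP : ∀ p ∈ P, 1 ≤ p) :
    ∀ (fuel : Nat) (stack seen : List Int) (cnt best : Int),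
    List.Nodup seen → List.Nodup stack → (∀ z ∈ stack, z ∈ seen) →
    (∀ z ∈ seen, 1 ≤ z ∧ z ≤ limit) → (∀ z ∈ seen, G z) →
    (∀ z ∈ seen, z ∉ stack → ∀ p ∈ P, z * p ≤ limit → z * p ∈ seen) →
    best ∈ seen → (∀ z ∈ seen, z ∉ stack → z ≤ best) →
    cnt = (seen.length : Int) - stack.length →
    limit.toNat + 2 + stack.length ≤ fuel + seen.length →
    ∃ seenF bestF, bLoop P limit fuel stack seen cnt best = some [(seenF.length : Int), bestF] ∧
      List.Nodup seenF ∧ (∀ z ∈ seen, z ∈ seenF) ∧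
      (∀ z ∈ seenF, 1 ≤ z ∧ z ≤ limit) ∧ (∀ z ∈ seenF, G z) ∧
      (∀ z ∈ seenF, ∀ p ∈ P, z * p ≤ limit → z * p ∈ seenF) ∧
      bestF ∈ seenF ∧ (∀ z ∈ seenF, z ≤ bestF) := by
  intro fuel
  induction fuel with
  | zero =>
      intro stack seen cnt best hsnd hqnd hqs hb hG hI5 hbmem hbmax hcnt hfuel
      have := length_le_of_nodup_bounds hsnd hb
      omega
  | succ f ih =>
      intro stack seen cnt best hsnd hqnd hqs hb hG hI5 hbmem hbmax hcnt hfuel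
      match stack with
      | [] =>
          have hc : cnt = (seen.length : Int) := by
            simp only [List.length_nil] at hcnt
            omega
          refine ⟨seen, best, ?_, hsnd, fun z hz => hz, hb, hG, ?_, hbmem, ?_⟩
          · simp only [bLoop, hc]
          · intro z hz p hp hle
            exact hI5 z hz (by simp) p hp hle
          · intro z hz
            exact hbmax z hz (by simp)
      | x :: rest =>
          have hx : x ∈ seen := hqs x (by simp)
          have hx1 : 1 ≤ x := (hb x hx).1
          have hxrest : x ∉ rest := (List.nodup_cons.mp hqnd).1
          have hrest_nd : rest.Nodup := (List.nodup_cons.mp hqnd).2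
          obtain ⟨q', s', hrun, h1, h2, h3, h4, h5, h6, h7, h8⟩ :=
            bInner_main limit x P rest seen hsnd hrest_nd (fun z hz => hqs z (by simp [hz]))
          have hb' : ∀ z ∈ s', 1 ≤ z ∧ z ≤ limit := by
            intro z hz
            rcases h5 z hz with h | ⟨p, hp, rfl, hle⟩
            · exact hb z h
            · have h1p := hP p hp
              constructor
              · nlinarith
              · exact hle
          have hG' : ∀ z ∈ s', G z := by
            intro z hz
            rcases h5 z hz with h | ⟨p, hp, rfl, _⟩
            · exact hG z h
            · exact hGmul x p (hG x hx) hp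
          have hprocessed : ∀ z ∈ s', z ∉ q' → z ∈ seen ∧ z ∉ rest := by
            intro z hz hzq
            rw [h6 z] at hzq
            push_neg at hzq
            exact ⟨hzq.2 hz, hzq.1⟩
          have hI5' : ∀ z ∈ s', z ∉ q' → ∀ p ∈ P, z * p ≤ limit → z * p ∈ s' := by
            intro z hz hzq p hp hle
            obtain ⟨hzseen, hzrest⟩ := hprocessed z hz hzq
            by_cases hzx : z = x
            · subst hzx
              exact h7 p hp hle
            · have : z ∉ x :: rest := by
                intro hmem
                rcases List.mem_cons.mp hmem with h | h
                · exact hzx h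
                · exact hzrest h
              exact h4 _ (hI5 z hzseen this p hp hle)
          have hbest'mem : (if x > best then x else best) ∈ s' := by
            split
            · exact h4 x hx
            · exact h4 best hbmem
          have hbest'max : ∀ z ∈ s', z ∉ q' → z ≤ (if x > best then x else best) := by
            intro z hz hzq
            obtain ⟨hzseen, hzrest⟩ := hprocessed z hz hzq
            by_cases hzx : z = x
            · subst hzx; split <;> omega
            · have : z ∉ x :: rest := by
                intro hmem
                rcases List.mem_cons.mp hmem with h | h
                · exact hzx h
                · exact hzrest h
              have := hbmax z hzseen this
              split <;> omega
          have hcnt' : cnt + 1 = (s'.length : Int) - q'.length := by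
            simp only [List.length_cons] at hcnt
            have : (s'.length : Int) + rest.length = seen.length + q'.length := by
              exact_mod_cast h8
            push_cast at hcnt this ⊢
            omega
          have hfuel' : limit.toNat + 2 + q'.length ≤ f + s'.length := by
            simp only [List.length_cons] at hfuel
            omega
          obtain ⟨seenF, bestF, hres, hF1, hF2, hF3, hF4, hF5, hF6, hF7⟩ :=
            ih q' s' (cnt + 1) (if x > best then x else best) h1 h2 h3 hb' hG' hI5'
              hbest'mem hbest'max hcnt' hfuel'
          refine ⟨seenF, bestF, ?_, hF1, fun z hz => hF2 z (h4 z hz), hF3, hF4, hF5, hF6, hF7⟩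
          simp only [bLoop, hrun]
          exact hres

theorem foldl_mul_eq_prod : ∀ l : List Int, l.foldl (· * ·) 1 = l.prod := by
  intro l
  rw [List.prod_eq_foldl]

theorem aOuter_zero (limit : Int) (hlim : 0 ≤ limit) :
    ∀ rest : List Int, aOuter limit rest [0] = some [0] := by
  intro rest
  induction rest with
  | nil => rfl
  | cons p rest' ih =>
      have h0p : (0 : Int) * p = 0 := by ring
      have hchain : aChain p limit ((limit - 0 * p).toNat + 2) [0] (0 * p) = some [0] := by
        show aChain p limit ((limit - 0 * p).toNat + 1 + 1) [0] (0 * p) = some [0]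
        simp only [aChain, h0p]
        rw [if_neg (by simp)]
      have hinner : aInner p limit (limit.toNat + 2) [0] 0 = some [0] := by
        show aInner p limit (limit.toNat + 1 + 1) [0] 0 = some [0]
        simp only [aInner, List.getElem?_cons_zero, hchain]
        show aInner p limit (limit.toNat + 1) [0] 1 = some [0]
        simp only [aInner]
        rw [show ([0] : List Int)[1]? = none from rfl]
      simp only [aOuter, hinner, ih]

-- B: from 0 every generated value is 0*p = 0, already seen, so the closure stops at once
theorem bInner_zero (limit : Int) :
    ∀ (ps stack seen : List Int), (0 : Int) ∈ seen →
    bInner limit 0 ps stack seen = (stack, seen) := by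
  intro ps
  induction ps with
  | nil => intro _ _ _; rfl
  | cons p ps' ih =>
      intro stack seen h0
      have : ¬ ((0 : Int) * p ≤ limit ∧ ¬ (0 : Int) * p ∈ seen) := by
        rw [zero_mul]
        intro h
        exact h.2 h0
      simp only [bInner, if_neg this]
      exact ih stack seen h0

theorem bLoop_zero (P : List Int) (limit : Int) (f : Nat) :
    bLoop P limit (f + 2) [0] [0] 0 0 = some [1, 0] := by
  show bLoop P limit (f + 1 + 1) [0] [0] 0 0 = some [1, 0]
  simp only [bLoop, bInner_zero limit P [] [0] (by simp)]
  norm_num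

-- ===== VERDICT (by name: the statement is the Claim_ definition above) =====
theorem count_find_num_spec : Claim_equal_count_find_num := by
  intro primesL limit hdom hpre
  unfold Spec_count_find_num
  by_cases hgt : primesL.foldl (· * ·) 1 > limit
  · simp only [count_find_num, count_find_num_alt, if_pos hgt]
  · by_cases h0 : primesL.foldl (· * ·) 1 = 0
    · have hlim : (0 : Int) ≤ limit := by omega
      have hof : PySem.Set.ofList ([0] : List Int) = [0] :=
        PySem.Set.ofList_eq_self_of_nodup [0] (List.nodup_singleton _)
      simp only [count_find_num, count_find_num_alt, h0,
        aOuter_zero limit hlim primesL, hof, bLoop_zero primesL limit limit.toNat]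
      simp [PySem.List.max?_id_cons]
    · -- main case: all elements positive
      have hall0 : ∀ p ∈ primesL, 0 ≤ p := by
        rcases hpre with h | h | h
        · exact h
        · rw [← foldl_mul_eq_prod] at h
          exact absurd h hgt
        · exact (h0 (by rw [foldl_mul_eq_prod]; exact List.prod_eq_zero h)).elim
      have hprodne : primesL.prod ≠ 0 := by
        rw [← foldl_mul_eq_prod]; exact h0
      have hall1 : ∀ p ∈ primesL, 1 ≤ p := by
        intro p hp
        have h0p := hall0 p hp
        rcases eq_or_lt_of_le h0p with h | h
        · exact (hprodne (List.prod_eq_zero (show (0:Int) ∈ primesL from h ▸ hp))).elim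
        · omega
      have hnum1 : 1 ≤ primesL.foldl (· * ·) 1 := by
        rw [foldl_mul_eq_prod]; exact list_prod_pos hall1
      have hnumle : primesL.foldl (· * ·) 1 ≤ limit := by omega
      set numbers := primesL.foldl (· * ·) 1 with hnumdef
      -- A side
      obtain ⟨r, hsome, hrnd, hrb, hrchar⟩ :=
        aOuter_char limit primesL [numbers] hall1 (List.nodup_singleton _)
          (by intro x hx; simp only [List.mem_singleton] at hx; subst hx; exact ⟨hnum1, hnumle⟩)
      have hrchar' : ∀ x, x ∈ r ↔ ∃ l : List Int, (∀ q ∈ l, q ∈ primesL) ∧ x = numbers * l.prod ∧ x ≤ limit := by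
        intro x
        rw [hrchar x]
        constructor
        · rintro ⟨y, hy, l, hl, rfl, hle⟩
          simp only [List.mem_singleton] at hy
          exact ⟨l, hl, by rw [hy], hle⟩
        · rintro ⟨l, hl, rfl, hle⟩
          exact ⟨numbers, by simp, l, hl, rfl, hle⟩
      -- B side
      have hof : PySem.Set.ofList [numbers] = [numbers] :=
        PySem.Set.ofList_eq_self_of_nodup [numbers] (List.nodup_singleton _)
      obtain ⟨seenF, bestF, hres, hFnd, hFsub, hFb, hFG, hFclosed, hFbmem, hFbmax⟩ :=
        bLoop_main primesL limit (fun z => ∃ l : List Int, (∀ q ∈ l, q ∈ primesL) ∧ z = numbers * l.prod)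
          (by rintro z p ⟨l, hl, rfl⟩ hp
              refine ⟨l ++ [p], ?_, by rw [List.prod_append]; simp; ring⟩
              intro q hq
              rcases List.mem_append.mp hq with h | h
              · exact hl q h
              · simp only [List.mem_singleton] at h; exact h ▸ hp)
          hall1 (limit.toNat + 2) [numbers] [numbers] 0 numbers
          (List.nodup_singleton _) (List.nodup_singleton _) (fun z hz => hz)
          (by intro z hz; simp only [List.mem_singleton] at hz; subst hz; exact ⟨hnum1, hnumle⟩)
          (by intro z hz; simp only [List.mem_singleton] at hz; subst hz
              exact ⟨[], by simp, by simp⟩)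
          (by intro z hz hznq; exact absurd hz hznq)
          (by simp) (by intro z hz hznq; exact absurd hz hznq)
          (by simp) (by simp)
      have hFreach : ∀ l : List Int, (∀ q ∈ l, q ∈ primesL) → numbers * l.prod ≤ limit → numbers * l.prod ∈ seenF := by
        intro l
        induction l with
        | nil =>
            intro _ _
            simpa using hFsub numbers (by simp)
        | cons q t iht =>
            intro hql hle
            have hq : q ∈ primesL := hql q (by simp)
            have h1q := hall1 q hq
            have ht1 : (1 : Int) ≤ t.prod :=
              list_prod_pos (fun z hz => hall1 z (hql z (by simp [hz])))
            have hy1 : 1 ≤ numbers * t.prod := by nlinarith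
            have heq : numbers * (q :: t).prod = (numbers * t.prod) * q := by
              rw [List.prod_cons]; ring
            rw [heq] at hle ⊢
            have hyle : numbers * t.prod ≤ limit := by nlinarith
            have hyF := iht (fun z hz => hql z (by simp [hz])) hyle
            exact hFclosed _ hyF q hq hle
      have hFchar : ∀ x, x ∈ seenF ↔ ∃ l : List Int, (∀ q ∈ l, q ∈ primesL) ∧ x = numbers * l.prod ∧ x ≤ limit := by
        intro x
        constructor
        · intro hx
          obtain ⟨l, hl, hxe⟩ := hFG x hx
          exact ⟨l, hl, hxe, (hFb x hx).2⟩
        · rintro ⟨l, hl, rfl, hle⟩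
          exact hFreach l hl hle
      -- the two characterisations coincide
      have hmemeq : ∀ x, x ∈ r ↔ x ∈ seenF := by
        intro x
        rw [hrchar' x, hFchar x]
      have hperm : r.Perm seenF := (List.perm_ext_iff_of_nodup hrnd hFnd).mpr hmemeq
      have hlen : r.length = seenF.length := hperm.length_eq
      have hnumr : numbers ∈ r := (hrchar' numbers).mpr ⟨[], by simp, by simp, hnumle⟩
      -- the maximum
      obtain ⟨m, hm⟩ : ∃ m, PySem.List.max? r (fun y => y) = some m := by
        match h : PySem.List.max? r (fun y => y) with
        | some m => exact ⟨m, rfl⟩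
        | none =>
            rw [PySem.List.max?_eq_none_iff] at h
            rw [h] at hnumr
            simp at hnumr
      have hmmem : m ∈ r := PySem.List.max?_mem hm
      have hmmax : ∀ y ∈ r, y ≤ m := by
        intro y hy
        exact PySem.List.max?_isMax hm y hy
      have hmbest : m = bestF := by
        apply le_antisymm
        · exact hFbmax m ((hmemeq m).mp hmmem)
        · exact hmmax bestF ((hmemeq bestF).mpr hFbmem)
      -- assemble
      simp only [count_find_num, count_find_num_alt, if_neg hgt, ← hnumdef,
        hof, hsome, hres, hm]
      simp [hlen, hmbest]
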